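-- pv_equiv track=rewrite | github.com/dasaro/ABA-variants | WABA/test/test_strict_inclusions.py | is_strict_subset
-- ===== SOURCE A (Python) =====
-- from typing import Set, FrozenSet, List
--
-- def is_strict_subset(set_a: List[FrozenSet[str]], set_b: List[FrozenSet[str]]) -> bool:
--     """Check if A ⊂ B (strict: A ⊆ B and A ≠ B)"""
--     # A ⊆ B: every element of A is in B
--     for ext_a in set_a:
--         if ext_a not in set_b:
--             return False
--
--     # A ≠ B: B has at least one element not in A
--     for ext_b in set_b:
--         if ext_b not in set_a:
--             return True
--
--     return False  # A = B
-- ===== SOURCE B (Python) =====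
-- def is_strict_subset(set_a, set_b):
--     """Check if A ⊂ B (strict: A ⊆ B and A ≠ B)"""
--     # containment exactly as a loop over set_a
--     for ext_a in set_a:
--         if ext_a not in set_b:
--             return False
--     # strictness by distinct-cardinality comparison instead of a witness search
--     return len({frozenset(s) for s in set_a}) < len({frozenset(s) for s in set_b})
-- ===== Notes on version B (the rewrite author's own statement) =====
-- stated objective: alternative
-- what changed: The second pass searching set_b for a witness element absent from set_a is replaced by a counting argument: after containment is verified, strictness holds iff set_b has strictly more distinct elements than set_a.
import Mathlib
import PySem

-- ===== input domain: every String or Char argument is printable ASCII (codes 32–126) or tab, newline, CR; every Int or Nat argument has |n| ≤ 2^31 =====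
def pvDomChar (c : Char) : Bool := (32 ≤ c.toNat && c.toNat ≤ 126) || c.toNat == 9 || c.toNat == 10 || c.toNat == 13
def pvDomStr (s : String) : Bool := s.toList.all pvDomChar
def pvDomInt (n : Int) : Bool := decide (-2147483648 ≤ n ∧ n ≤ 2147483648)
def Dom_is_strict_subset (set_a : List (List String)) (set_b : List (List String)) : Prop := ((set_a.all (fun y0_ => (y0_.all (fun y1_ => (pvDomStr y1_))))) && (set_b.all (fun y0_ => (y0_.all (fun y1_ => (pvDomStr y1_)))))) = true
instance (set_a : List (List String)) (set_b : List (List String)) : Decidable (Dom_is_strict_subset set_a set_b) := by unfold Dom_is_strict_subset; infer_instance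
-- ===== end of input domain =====

-- B replaces A's second pass (a scan of set_b for a witness not in set_a) by a
-- distinct-cardinality comparison; same cost, different decomposition.

-- ===== PORT A =====
-- elements are Python sets of strings: `x in l` compares them as sets
def pvSameSet (x y : List String) : Bool := PySem.Set.equal (PySem.Set.ofList x) (PySem.Set.ofList y)

def pvMem (l : List (List String)) (x : List String) : Bool := l.any (fun y => pvSameSet x y)

-- second loop of A: scan set_b for an element not in set_a
def pvLoop2 (sa : List (List String)) : List (List String) → Bool
  | [] => false
  | y :: rest => if !(pvMem sa y) then true else pvLoop2 sa rest

-- first loop of A: containment check with early False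
def pvLoop1 (sa sb : List (List String)) : List (List String) → Bool
  | [] => pvLoop2 sa sb
  | x :: rest => if !(pvMem sb x) then false else pvLoop1 sa sb rest

def is_strict_subset (set_a : List (List String)) (set_b : List (List String)) : Bool :=
  pvLoop1 set_a set_b set_a

-- ===== PORT B =====
-- frozenset(s) as a canonical value: the strictly sorted list of s's distinct elements
def pvCanon (x : List String) : List String := PySem.List.sorted (PySem.Set.ofList x) (fun s => s) false

-- len({frozenset(s) for s in l})
def pvDistinct (l : List (List String)) : Nat := (PySem.Set.ofList (l.map pvCanon)).length

def is_strict_subset_alt (set_a : List (List String)) (set_b : List (List String)) : Bool :=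
  set_a.all (fun x => pvMem set_b x) && decide (pvDistinct set_a < pvDistinct set_b)

-- ===== PRECONDITION & SPEC =====
def Spec_is_strict_subset (set_a : List (List String)) (set_b : List (List String)) (out : Bool) : Prop := out = is_strict_subset_alt set_a set_b
instance (set_a : List (List String)) (set_b : List (List String)) (out : Bool) : Decidable (Spec_is_strict_subset set_a set_b out) := by unfold Spec_is_strict_subset; infer_instance

-- ===== CLAIM (what is proved, stated in full; the proofs are below) =====
def Claim_equal_is_strict_subset : Prop := ∀ (set_a : List (List String)) (set_b : List (List String)), Dom_is_strict_subset set_a set_b → Spec_is_strict_subset set_a set_b (is_strict_subset set_a set_b)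

-- ===== LEMMAS AND PROOFS =====

lemma pvCanon_eq_iff (x y : List String) : pvCanon x = pvCanon y ↔ (∀ z, z ∈ x ↔ z ∈ y) := by
  unfold pvCanon
  rw [PySem.List.sorted_id_eq_sorted_id_iff_perm]
  rw [List.perm_ext_iff_of_nodup (PySem.Set.nodup_ofList x) (PySem.Set.nodup_ofList y)]
  simp [PySem.Set.mem_ofList]

lemma pvSameSet_iff (x y : List String) : pvSameSet x y = true ↔ pvCanon x = pvCanon y := by
  unfold pvSameSet
  rw [PySem.Set.equal_iff, pvCanon_eq_iff]
  simp [PySem.Set.mem_ofList]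

lemma pvMem_iff (l : List (List String)) (x : List String) :
    pvMem l x = true ↔ pvCanon x ∈ l.map pvCanon := by
  simp only [pvMem, List.any_eq_true, List.mem_map]
  constructor
  · rintro ⟨y, hy, h⟩; exact ⟨y, hy, ((pvSameSet_iff x y).1 h).symm⟩
  · rintro ⟨y, hy, h⟩; exact ⟨y, hy, (pvSameSet_iff x y).2 h.symm⟩

lemma pvDistinct_eq (l : List (List String)) :
    pvDistinct l = (l.map pvCanon).toFinset.card := by
  unfold pvDistinct
  have hfin : (PySem.Set.ofList (l.map pvCanon)).toFinset = (l.map pvCanon).toFinset := by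
    ext z; simp [PySem.Set.mem_ofList]
  rw [← List.toFinset_card_of_nodup (PySem.Set.nodup_ofList _), hfin]

lemma pvLoop2_eq (sa sb : List (List String)) :
    pvLoop2 sa sb = sb.any (fun y => !(pvMem sa y)) := by
  induction sb with
  | nil => simp [pvLoop2]
  | cons y rest ih =>
      simp only [pvLoop2, List.any_cons]
      by_cases h : pvMem sa y = true <;> simp [h, ih]

lemma pvLoop1_eq (sa sb : List (List String)) (l : List (List String)) :
    pvLoop1 sa sb l = if l.all (fun x => pvMem sb x) then pvLoop2 sa sb else false := by
  induction l with
  | nil => simp [pvLoop1]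
  | cons x rest ih =>
      simp only [pvLoop1, List.all_cons]
      by_cases h : pvMem sb x = true <;> simp [h, ih]

lemma pv_count_iff (sa sb : List (List String))
    (h : ∀ x ∈ sa, pvMem sb x = true) :
    (sb.any (fun y => !(pvMem sa y)) = true) ↔ pvDistinct sa < pvDistinct sb := by
  rw [pvDistinct_eq, pvDistinct_eq]
  have hsub : (sa.map pvCanon).toFinset ⊆ (sb.map pvCanon).toFinset := by
    intro z hz
    rw [List.mem_toFinset, List.mem_map] at hz
    obtain ⟨x, hx, rfl⟩ := hz
    rw [List.mem_toFinset]
    exact (pvMem_iff sb x).1 (h x hx)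
  constructor
  · rintro hany
    rw [List.any_eq_true] at hany
    obtain ⟨y, hy, hnot⟩ := hany
    have hyB : pvCanon y ∈ (sb.map pvCanon).toFinset := by
      rw [List.mem_toFinset]; exact List.mem_map_of_mem hy
    have hyA : pvCanon y ∉ (sa.map pvCanon).toFinset := by
      rw [List.mem_toFinset]
      simp only [Bool.not_eq_eq_eq_not, Bool.not_true] at hnot
      intro hmem
      exact absurd ((pvMem_iff sa y).2 hmem) (by simp [hnot])
    exact Finset.card_lt_card ⟨hsub, fun hBA => hyA (hBA hyB)⟩
  · intro hcard
    by_contra hno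
    rw [List.any_eq_true] at hno
    push Not at hno
    have hBA : (sb.map pvCanon).toFinset ⊆ (sa.map pvCanon).toFinset := by
      intro z hz
      rw [List.mem_toFinset, List.mem_map] at hz
      obtain ⟨y, hy, rfl⟩ := hz
      have := hno y hy
      rw [List.mem_toFinset]
      exact (pvMem_iff sa y).1 (by simpa using this)
    exact absurd (Finset.card_le_card hBA) (by omega)

-- ===== VERDICT (by name: the statement is the Claim_ definition above) =====
theorem is_strict_subset_spec : Claim_equal_is_strict_subset := by
  intro sa sb _
  unfold Spec_is_strict_subset is_strict_subset is_strict_subset_alt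
  rw [pvLoop1_eq]
  by_cases h : sa.all (fun x => pvMem sb x) = true
  · rw [if_pos h]
    have hall : ∀ x ∈ sa, pvMem sb x = true := by
      rw [List.all_eq_true] at h; exact h
    rw [pvLoop2_eq]
    simp only [h, Bool.true_and]
    rcases Bool.eq_false_or_eq_true (sb.any (fun y => !(pvMem sa y))) with hv | hv
    · rw [hv]
      have := (pv_count_iff sa sb hall).1 hv
      simp [this]
    · rw [hv]
      have := (pv_count_iff sa sb hall).not.1 (by simp [hv])
      simp [this]
  · rw [if_neg h]
    simp only [Bool.not_eq_true] at h
    simp [h]
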